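-- pv_equiv track=rewrite | github.com/xiaowangzi-rgb/MSWebTools | scripts/sync-font-coverage.py | to_ranges
-- ===== SOURCE A (Python) =====
-- def to_ranges(codepoints: set[int]) -> list[list[int]]:
--     if not codepoints:
--         return []
--     sorted_cps = sorted(codepoints)
--     ranges: list[list[int]] = []
--     start = sorted_cps[0]
--     prev = start
--     for cp in sorted_cps[1:]:
--         if cp == prev + 1:
--             prev = cp
--             continue
--         ranges.append([start, prev])
--         start = cp
--         prev = cp
--     ranges.append([start, prev])
--     return ranges
-- ===== SOURCE B (Python) =====
-- def to_ranges(codepoints: set[int]) -> list[list[int]]: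
--     cps = sorted(codepoints)
--     starts = [c for c in cps if c - 1 not in codepoints]
--     ends = [c for c in cps if c + 1 not in codepoints]
--     return [[s, e] for s, e in zip(starts, ends)]
-- ===== Notes on version B (the rewrite author's own statement) =====
-- stated objective: alternative
-- what changed: Replaces the stateful coalescing scan (start/prev accumulator loop) by direct boundary extraction: a codepoint starts a range iff cp-1 is absent and ends one iff cp+1 is absent, and the sorted starts are zipped with the sorted ends.
import Mathlib
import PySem

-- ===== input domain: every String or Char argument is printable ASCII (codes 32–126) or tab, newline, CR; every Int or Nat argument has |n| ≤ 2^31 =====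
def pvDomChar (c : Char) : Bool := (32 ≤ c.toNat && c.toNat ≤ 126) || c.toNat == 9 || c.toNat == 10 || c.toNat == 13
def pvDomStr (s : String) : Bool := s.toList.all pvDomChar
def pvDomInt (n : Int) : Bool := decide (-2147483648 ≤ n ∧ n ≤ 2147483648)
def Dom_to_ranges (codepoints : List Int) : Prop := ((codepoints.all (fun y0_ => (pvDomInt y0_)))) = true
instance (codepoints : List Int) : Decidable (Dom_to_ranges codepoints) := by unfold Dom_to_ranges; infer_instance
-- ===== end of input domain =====

-- B replaces A's stateful coalescing scan by boundary extraction (range starts/ends found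
-- by membership tests) zipped together; same asymptotic cost, different decomposition.

-- ===== PORT A =====
-- the for-loop body over sorted_cps[1:], state = (ranges, start, prev)
def pvLoopA (st : List (List Int) × Int × Int) (cp : Int) : List (List Int) × Int × Int :=
  if cp = st.2.2 + 1 then (st.1, st.2.1, cp)
  else (st.1 ++ [[st.2.1, st.2.2]], cp, cp)

def to_ranges (codepoints : List Int) : List (List Int) :=
  if codepoints = [] then []
  else
    match PySem.List.sorted codepoints (fun x => x) false with
    | [] => []   -- unreachable: sorted of a nonempty list is nonempty
    | s :: rest =>
      let st := rest.foldl pvLoopA ([], s, s)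
      st.1 ++ [[st.2.1, st.2.2]]

-- ===== PORT B =====
def to_ranges_alt (codepoints : List Int) : List (List Int) :=
  let cps := PySem.List.sorted codepoints (fun x => x) false
  let starts := cps.filter (fun c => !(codepoints.contains (c - 1)))
  let ends := cps.filter (fun c => !(codepoints.contains (c + 1)))
  (starts.zip ends).map (fun p => [p.1, p.2])

-- ===== PRECONDITION & SPEC =====
-- Pre_: the Python parameter is a set[int]; under the type convention it is a list of
-- DISTINCT elements, so Pre_ states exactly that (no real input of A is excluded).
def Pre_to_ranges (codepoints : List Int) : Prop := codepoints.Nodup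
instance (codepoints : List Int) : Decidable (Pre_to_ranges codepoints) := by unfold Pre_to_ranges; infer_instance
def pvWitness_to_ranges : List Int := [5, 1, 2, 9]

def Spec_to_ranges (codepoints : List Int) (out : List (List Int)) : Prop := out = to_ranges_alt codepoints
instance (codepoints : List Int) (out : List (List Int)) : Decidable (Spec_to_ranges codepoints out) := by unfold Spec_to_ranges; infer_instance

-- ===== CLAIM (what is proved, stated in full; the proofs are below) =====
def Claim_equal_to_ranges : Prop := ∀ (codepoints : List Int), Dom_to_ranges codepoints → Pre_to_ranges codepoints → Spec_to_ranges codepoints (to_ranges codepoints)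

-- ===== LEMMAS AND PROOFS =====

-- range starts strictly after the head: a new range opens at c exactly when c ≠ prev+1
def startsAux (p : Int) : List Int → List Int
  | [] => []
  | c :: t => (if c = p + 1 then [] else [c]) ++ startsAux c t

-- range ends including the pending prev
def endsAux (p : Int) : List Int → List Int
  | [] => [p]
  | c :: t => (if c = p + 1 then [] else [p]) ++ endsAux c t

-- A's scan, finished off, equals the zip of the boundary lists (no ordering needed)
theorem scanA_eq (rest : List Int) : ∀ (acc : List (List Int)) (start prev : Int),
    (let st := rest.foldl pvLoopA (acc, start, prev); st.1 ++ [[st.2.1, st.2.2]])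
      = acc ++ ((start :: startsAux prev rest).zip (endsAux prev rest)).map (fun p => [p.1, p.2]) := by
  induction rest with
  | nil => intro acc start prev; simp [startsAux, endsAux]
  | cons c t ih =>
    intro acc start prev
    by_cases h : c = prev + 1
    · simpa [pvLoopA, h, startsAux, endsAux] using ih acc start c
    · simpa [pvLoopA, h, startsAux, endsAux, List.append_assoc] using ih (acc ++ [[start, prev]]) c c

theorem filt_starts (rest : List Int) : ∀ (pre : List Int) (p : Int),
    List.Pairwise (· < ·) (p :: rest) → (∀ x ∈ pre, x < p) →
    rest.filter (fun c => !((pre ++ p :: rest).contains (c - 1))) = startsAux p rest := by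
  induction rest with
  | nil => intro pre p _ _; simp [startsAux]
  | cons c t ih =>
    intro pre p hpw hpre
    have hpc : p < c := (List.pairwise_cons.1 hpw).1 c (by simp)
    have ht : ∀ y ∈ t, c < y := (List.pairwise_cons.1 (List.pairwise_cons.1 hpw).2).1
    have hmem : ((pre ++ p :: c :: t).contains (c - 1)) = decide (c = p + 1) := by
      by_cases h : c = p + 1
      · simp [h, List.contains_append]
      · have h1 : c - 1 ∉ pre := fun hc => by have := hpre _ hc; omega
        have h2 : c - 1 ∉ t := fun hc => by have := ht _ hc; omega
        have h3 : ¬ (c - 1 = p) := by omega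
        simp [h, h1, h2, h3, List.contains_eq_mem]
    have ihr : List.filter (fun x => !((pre ++ p :: c :: t).contains (x - 1))) t
        = startsAux c t := by
      have := ih (pre ++ [p]) c (List.pairwise_cons.1 hpw).2
        (by intro x hx; rcases List.mem_append.1 hx with h | h
            · exact lt_trans (hpre _ h) hpc
            · simpa using (by simp at h; omega : x < c))
      simpa [List.append_assoc] using this
    rw [List.filter_cons, hmem]
    by_cases h : c = p + 1
    · rw [if_neg (by simp [h]), ihr]
      simp [startsAux, h]
    · rw [if_pos (by simp [h]), ihr]
      simp [startsAux, h]

theorem filt_ends (rest : List Int) : ∀ (pre : List Int) (p : Int),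
    List.Pairwise (· < ·) (p :: rest) → (∀ x ∈ pre, x < p) →
    (p :: rest).filter (fun c => !((pre ++ p :: rest).contains (c + 1))) = endsAux p rest := by
  induction rest with
  | nil =>
    intro pre p _ hpre
    have h1 : p + 1 ∉ pre := fun hc => by have := hpre _ hc; omega
    simp [endsAux, h1, List.contains_eq_mem]
  | cons c t ih =>
    intro pre p hpw hpre
    have hpc : p < c := (List.pairwise_cons.1 hpw).1 c (by simp)
    have ht : ∀ y ∈ t, c < y := (List.pairwise_cons.1 (List.pairwise_cons.1 hpw).2).1
    have hmem : ((pre ++ p :: c :: t).contains (p + 1)) = decide (c = p + 1) := by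
      by_cases h : c = p + 1
      · simp [← h, List.contains_append]
      · have h1 : p + 1 ∉ pre := fun hc => by have := hpre _ hc; omega
        have h2 : p + 1 ∉ t := fun hc => by have := ht _ hc; omega
        have h3 : ¬ (p + 1 = c) := by omega
        have h4 : ¬ (p + 1 = p) := by omega
        simp [h, h1, h2, h3, h4, List.contains_eq_mem]
    have ihr : List.filter (fun x => !((pre ++ p :: c :: t).contains (x + 1))) (c :: t)
        = endsAux c t := by
      have := ih (pre ++ [p]) c (List.pairwise_cons.1 hpw).2
        (by intro x hx; rcases List.mem_append.1 hx with h | h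
            · exact lt_trans (hpre _ h) hpc
            · simpa using (by simp at h; omega : x < c))
      simpa [List.append_assoc] using this
    rw [List.filter_cons, hmem]
    by_cases h : c = p + 1
    · rw [if_neg (by simp [h]), ihr]
      simp [endsAux, h]
    · rw [if_pos (by simp [h]), ihr]
      simp [endsAux, h]

theorem to_ranges_spec : Claim_equal_to_ranges := by
  intro codepoints _ hnd
  unfold Spec_to_ranges to_ranges to_ranges_alt
  by_cases hnil : codepoints = []
  · simp [hnil, PySem.List.sorted]
  · set S := PySem.List.sorted codepoints (fun x => x) false with hS
    have hperm : S.Perm codepoints := PySem.List.sorted_perm codepoints (fun x => x) false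
    have hSnd : S.Nodup := hperm.nodup_iff.2 hnd
    have hle : List.Pairwise (fun a b => a ≤ b) S := by
      simpa using PySem.List.sorted_pairwise codepoints (fun x => x)
    have hlt : List.Pairwise (· < ·) S := by
      refine (hle.and hSnd).imp ?_
      rintro a b ⟨h1, h2⟩; exact lt_of_le_of_ne h1 h2
    have hcontains : ∀ y : Int, codepoints.contains y = S.contains y := by
      intro y; simp [List.contains_eq_mem, hperm.mem_iff]
    have hfil : ∀ (f : Int → Int) (l : List Int),
        l.filter (fun c => !(codepoints.contains (f c))) = l.filter (fun c => !(S.contains (f c))) := by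
      intro f l; exact List.filter_congr (fun a _ => by rw [hcontains])
    match hSm : S with
    | [] =>
      exact absurd hperm.symm.eq_nil hnil
    | s :: rest =>
      have hshead : ∀ y ∈ s :: rest, s ≤ y := by
        intro y hy
        rcases hy with _ | hy
        · exact le_refl _
        · exact le_of_lt ((List.pairwise_cons.1 hlt).1 y (by assumption))
      simp only [if_neg hnil, hfil]
      rw [scanA_eq]
      have hstart : (s :: rest).filter (fun c => !((s :: rest).contains (c - 1)))
          = s :: startsAux s rest := by
        rw [List.filter_cons]
        have hs1 : s - 1 ∉ (s :: rest) := fun hc => by have := hshead _ hc; omega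
        have : ((s :: rest).contains (s - 1)) = false := by
          simpa [List.contains_eq_mem] using hs1
        rw [this]
        simpa using filt_starts rest [] s hlt (by simp)
      have hend : (s :: rest).filter (fun c => !((s :: rest).contains (c + 1)))
          = endsAux s rest := by
        simpa using filt_ends rest [] s hlt (by simp)
      simp only [List.nil_append]
      rw [hstart, hend]
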